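-- pv_equiv track=rewrite | github.com/AsiaOstrich/universal-dev-standards | scripts/split-bilingual.py | add_language_switcher_en
-- ===== SOURCE A (Python) =====
-- def add_language_switcher_en(content: str, zh_path: str) -> str:
--     """Add language switcher to English version."""
--     lines = content.split('\n')
--     # Find first heading and insert after
--     for i, line in enumerate(lines):
--         if line.startswith('#') and not line.startswith('##'):
--             lines.insert(i + 1, '')
--             lines.insert(i + 2, f'> **Language**: English | [繁體中文]({zh_path})')
--             break
--     return '\n'.join(lines)
-- ===== SOURCE B (Python) =====
-- def add_language_switcher_en(content: str, zh_path: str) -> str: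
--     """Add language switcher to English version (single scan via str.partition)."""
--     out = []
--     rest = content
--     while True:
--         head, sep, tail = rest.partition('\n')
--         if head.startswith('#') and not head.startswith('##'):
--             out.append(head + '\n\n> **Language**: English | [\u7e41\u9ad4\u4e2d\u6587](' + zh_path + ')' + sep)
--             out.append(tail)
--             return ''.join(out)
--         if not sep:
--             out.append(head)
--             return ''.join(out)
--         out.append(head + sep)
--         rest = tail
-- ===== Notes on version B (the rewrite author's own statement) =====
-- stated objective: alternative
-- what changed: Replaced split-into-lines + enumerate + list.insert + join with a single left-to-right scan using str.partition that splices the switcher directly after the first top-level heading line.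
import Mathlib
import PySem

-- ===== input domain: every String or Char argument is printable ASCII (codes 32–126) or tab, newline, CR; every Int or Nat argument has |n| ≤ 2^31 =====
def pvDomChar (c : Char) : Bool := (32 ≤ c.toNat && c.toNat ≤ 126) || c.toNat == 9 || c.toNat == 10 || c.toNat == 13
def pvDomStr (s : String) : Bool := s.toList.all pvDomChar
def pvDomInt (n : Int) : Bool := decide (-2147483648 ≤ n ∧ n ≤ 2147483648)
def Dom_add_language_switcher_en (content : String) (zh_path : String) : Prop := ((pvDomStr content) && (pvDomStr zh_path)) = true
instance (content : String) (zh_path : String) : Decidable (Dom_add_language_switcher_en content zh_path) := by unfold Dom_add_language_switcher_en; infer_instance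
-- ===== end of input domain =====

-- B replaces A's split-into-lines / enumerate / insert / join pipeline by a single left-to-right
-- scan over the string with str.partition, splicing the switcher in place (objective: alternative).

-- the switcher line '> **Language**: English | [繁體中文]({zh_path})' as chars (shared literal)
def pvSwitcherChars (zh : List Char) : List Char :=
  "> **Language**: English | [繁體中文](".toList ++ zh ++ [')']

-- ===== PORT A =====
-- the for-loop with insert at i+1, i+2 and break: recursion over the remaining lines
def pvInsA (sw : List Char) : List (List Char) → List (List Char)
  | [] => []
  | l :: rest =>
    if PySem.Chars.startswith l ['#'] && !(PySem.Chars.startswith l ['#', '#']) then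
      l :: [] :: sw :: rest
    else
      l :: pvInsA sw rest

def add_language_switcher_en (content : String) (zh_path : String) : String :=
  String.mk (PySem.Chars.join ['\n']
    (pvInsA (pvSwitcherChars zh_path.toList) (PySem.Chars.splitOn content.toList ['\n'])))

-- ===== PORT B =====
-- the while-loop of Source B: out-accumulator `acc`, rest.partition('\n') = (takeWhile, dropWhile)
def pvGoB (ins : List Char) (acc : List Char) (cs : List Char) : List Char :=
  let head := cs.takeWhile (· ≠ '\n')
  let rest := cs.dropWhile (· ≠ '\n')
  if PySem.Chars.startswith head ['#'] && !(PySem.Chars.startswith head ['#', '#']) then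
    acc ++ head ++ ins ++ rest
  else if rest = [] then
    acc ++ head
  else
    pvGoB ins (acc ++ head ++ ['\n']) rest.tail
termination_by cs.length
decreasing_by
  rename_i hne
  have hle := List.length_dropWhile_le (fun x => decide (x ≠ '\n')) cs
  cases hdw : cs.dropWhile (fun x => decide (x ≠ '\n')) with
  | nil => exact absurd hdw hne
  | cons d t =>
    rw [hdw] at hle
    simp only [List.tail_cons]
    simp at hle ⊢
    omega

def add_language_switcher_en_alt (content : String) (zh_path : String) : String :=
  String.mk (pvGoB ('\n' :: '\n' :: pvSwitcherChars zh_path.toList) [] content.toList)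

-- ===== PRECONDITION & SPEC =====
def Spec_add_language_switcher_en (content : String) (zh_path : String) (out : String) : Prop := out = add_language_switcher_en_alt content zh_path
instance (content : String) (zh_path : String) (out : String) : Decidable (Spec_add_language_switcher_en content zh_path out) := by unfold Spec_add_language_switcher_en; infer_instance

-- ===== CLAIM (what is proved, stated in full; the proofs are below) =====
def Claim_equal_add_language_switcher_en : Prop := ∀ (content : String) (zh_path : String), Dom_add_language_switcher_en content zh_path → Spec_add_language_switcher_en content zh_path (add_language_switcher_en content zh_path)

-- ===== LEMMAS AND PROOFS =====

-- a clean recursion computing split('\n') (single-character separator)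
def pvSplit1 (c : Char) : List Char → List (List Char)
  | [] => [[]]
  | a :: t =>
    if a = c then [] :: pvSplit1 c t
    else (a :: (pvSplit1 c t).headI) :: (pvSplit1 c t).tail

theorem pvSplit1_ne_nil (c : Char) (cs : List Char) : pvSplit1 c cs ≠ [] := by
  cases cs with
  | nil => simp [pvSplit1]
  | cons a t => simp only [pvSplit1]; split_ifs <;> simp

theorem pvGo_eq (c : Char) : ∀ (fuel : Nat) (l cur : List Char) (acc : List (List Char)),
    l.length < fuel →
    PySem.Chars.splitOn.go [c] fuel l cur acc
      = acc.reverse ++ (pvSplit1 c l).modifyHead (cur.reverse ++ ·) := by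
  intro fuel
  induction fuel with
  | zero => intro l cur acc h; omega
  | succ f ih =>
    intro l cur acc h
    cases l with
    | nil => simp [PySem.Chars.splitOn.go, pvSplit1]
    | cons a t =>
      simp only [PySem.Chars.splitOn.go]
      by_cases hc : a = c
      · subst hc
        simp only [List.isPrefixOf, BEq.rfl, Bool.true_and, List.isPrefixOf_nil_left, if_true,
          List.length_cons, List.drop_succ_cons, List.drop_zero]
        simp only [List.length_nil, List.drop_zero]
        rw [ih t [] (cur.reverse :: acc) (by simpa using Nat.lt_of_succ_lt_succ h)]
        simp [pvSplit1, List.modifyHead, pvSplit1_ne_nil]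
        cases hsp : pvSplit1 a t with
        | nil => exact absurd hsp (pvSplit1_ne_nil a t)
        | cons x r => simp
      · have : ([c].isPrefixOf (a :: t)) = false := by
          simp [List.isPrefixOf]; exact fun hh => absurd hh.symm hc
        rw [if_neg (by simp [this])]
        rw [ih t (a :: cur) acc (by simpa using Nat.lt_of_succ_lt_succ h)]
        simp only [pvSplit1, if_neg hc]
        cases hsp : pvSplit1 c t with
        | nil => exact absurd hsp (pvSplit1_ne_nil c t)
        | cons x r => simp [List.modifyHead]

theorem splitOn_single (c : Char) (cs : List Char) :
    PySem.Chars.splitOn cs [c] = pvSplit1 c cs := by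
  unfold PySem.Chars.splitOn
  rw [pvGo_eq c (cs.length + 1) cs [] [] (by omega)]
  cases hsp : pvSplit1 c cs with
  | nil => exact absurd hsp (pvSplit1_ne_nil c cs)
  | cons x r => simp [List.modifyHead]

theorem join1 (c : Char) (x : List Char) : PySem.Chars.join [c] [x] = x := by
  simp [PySem.Chars.join, List.intercalate]

theorem join2 (c : Char) (x y : List Char) (l : List (List Char)) :
    PySem.Chars.join [c] (x :: y :: l) = x ++ c :: PySem.Chars.join [c] (y :: l) := by
  simp [PySem.Chars.join, List.intercalate, List.intersperse]

theorem join_pvSplit1 (c : Char) (cs : List Char) :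
    PySem.Chars.join [c] (pvSplit1 c cs) = cs := by
  induction cs with
  | nil => simp [pvSplit1, join1]
  | cons a t ih =>
    simp only [pvSplit1]
    by_cases hc : a = c
    · subst hc
      rw [if_pos rfl]
      cases hsp : pvSplit1 a t with
      | nil => exact absurd hsp (pvSplit1_ne_nil a t)
      | cons x r =>
        rw [hsp] at ih
        rw [join2, ← ih]
        simp
    · rw [if_neg hc]
      cases hsp : pvSplit1 c t with
      | nil => exact absurd hsp (pvSplit1_ne_nil c t)
      | cons x r =>
        simp only [hsp, List.headI, List.tail_cons]
        rw [hsp] at ih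
        cases r with
        | nil => rw [join1] at ih; rw [join1, ← ih]
        | cons z q => rw [join2] at ih; rw [join2, ← ih]; simp

theorem pvSplit1_eq (c : Char) (cs : List Char) :
    pvSplit1 c cs = cs.takeWhile (· ≠ c)
      :: (match cs.dropWhile (· ≠ c) with | [] => [] | _ :: t => pvSplit1 c t) := by
  induction cs with
  | nil => simp [pvSplit1]
  | cons a t ih =>
    simp only [pvSplit1]
    by_cases hc : a = c
    · subst hc
      simp [List.takeWhile, List.dropWhile]
    · rw [if_neg hc, ih]
      simp [List.takeWhile_cons, List.dropWhile_cons, hc]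

theorem pvSplit1_eq_nil (c : Char) (cs : List Char) (h : cs.dropWhile (· ≠ c) = []) :
    pvSplit1 c cs = [cs.takeWhile (· ≠ c)] := by
  rw [pvSplit1_eq, h]

theorem pvSplit1_eq_cons (c : Char) (cs t : List Char) (h : cs.dropWhile (· ≠ c) = c :: t) :
    pvSplit1 c cs = cs.takeWhile (· ≠ c) :: pvSplit1 c t := by
  rw [pvSplit1_eq, h]

theorem pvDropWhileHead (cs : List Char) (d : Char) (t : List Char)
    (h : cs.dropWhile (· ≠ '\n') = d :: t) : d = '\n' := by
  induction cs with
  | nil => simp at h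
  | cons a r ih =>
    rw [List.dropWhile_cons] at h
    by_cases ha : a = '\n'
    · rw [if_neg (by simp [ha])] at h
      exact ((List.cons.inj h).1.symm.trans ha)
    · rw [if_pos (by simp [ha])] at h
      exact ih h

theorem pvInsA_ne_nil (sw x : List Char) (r : List (List Char)) : pvInsA sw (x :: r) ≠ [] := by
  simp only [pvInsA]
  split_ifs <;> simp

theorem pvMain (sw : List Char) : ∀ (n : Nat) (cs acc : List Char), cs.length ≤ n →
    pvGoB ('\n' :: '\n' :: sw) acc cs
      = acc ++ PySem.Chars.join ['\n'] (pvInsA sw (pvSplit1 '\n' cs)) := by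
  intro n
  induction n with
  | zero =>
    intro cs acc h
    have : cs = [] := List.length_eq_zero_iff.mp (Nat.le_zero.mp h)
    subst this
    rw [pvGoB]
    simp [pvSplit1, pvInsA, PySem.Chars.startswith, List.isPrefixOf]
  | succ m ih =>
    intro cs acc h
    rw [pvGoB]
    by_cases hcond : (PySem.Chars.startswith (cs.takeWhile (· ≠ '\n')) ['#']
        && !(PySem.Chars.startswith (cs.takeWhile (· ≠ '\n')) ['#', '#'])) = true
    · -- heading found on the first line
      rw [if_pos hcond]
      cases hdw : cs.dropWhile (· ≠ '\n') with
      | nil =>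
        rw [pvSplit1_eq_nil '\n' cs hdw]
        simp only [pvInsA, hcond, if_pos]
        rw [join2, join2, join1]
        simp
      | cons d tail =>
        have hd : d = '\n' := pvDropWhileHead cs d tail hdw
        subst hd
        rw [pvSplit1_eq_cons '\n' cs tail hdw]
        simp only [pvInsA, hcond, if_pos]
        have hj : PySem.Chars.join ['\n'] (pvSplit1 '\n' tail) = tail := join_pvSplit1 '\n' tail
        cases hsp : pvSplit1 '\n' tail with
        | nil => exact absurd hsp (pvSplit1_ne_nil '\n' tail)
        | cons x r =>
          rw [hsp] at hj
          rw [join2, join2, join2, hj]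
          simp
    · -- no heading on the first line: emit it and continue
      rw [if_neg hcond]
      have hcond' : (PySem.Chars.startswith (cs.takeWhile (· ≠ '\n')) ['#']
          && !(PySem.Chars.startswith (cs.takeWhile (· ≠ '\n')) ['#', '#'])) = false := by
        simpa using hcond
      cases hdw : cs.dropWhile (· ≠ '\n') with
      | nil =>
        rw [if_pos rfl, pvSplit1_eq_nil '\n' cs hdw]
        simp only [pvInsA, hcond', Bool.false_eq_true, if_false]
        have hcs : cs.takeWhile (· ≠ '\n') = cs := by
          have htd := List.takeWhile_append_dropWhile (p := (· ≠ '\n')) (l := cs)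
          rw [hdw] at htd
          simpa using htd
        simp [hcs]
      | cons d tail =>
        have hd : d = '\n' := pvDropWhileHead cs d tail hdw
        subst hd
        have htail : tail.length ≤ m := by
          have hle := List.length_dropWhile_le (fun x => x ≠ '\n') cs
          rw [hdw] at hle
          simp at hle
          omega
        rw [if_neg (by simp), pvSplit1_eq_cons '\n' cs tail hdw]
        simp only [List.tail_cons]
        rw [ih tail (acc ++ cs.takeWhile (· ≠ '\n') ++ ['\n']) htail]
        simp only [pvInsA, hcond', Bool.false_eq_true, if_false]
        cases hsp : pvSplit1 '\n' tail with
        | nil => exact absurd hsp (pvSplit1_ne_nil '\n' tail)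
        | cons x r =>
          cases hin : pvInsA sw (x :: r) with
          | nil => exact absurd hin (pvInsA_ne_nil sw x r)
          | cons y q =>
            rw [join2]
            simp

-- ===== VERDICT (by name: the statement is the Claim_ definition above) =====
theorem add_language_switcher_en_spec : Claim_equal_add_language_switcher_en := by
  intro content zh_path _
  unfold Spec_add_language_switcher_en add_language_switcher_en add_language_switcher_en_alt
  rw [splitOn_single]
  refine congrArg String.mk ?_
  rw [pvMain (pvSwitcherChars zh_path.toList) content.toList.length content.toList [] le_rfl]
  simp
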